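-- pv_equiv track=rewrite | github.com/cliaer/coding_solutions | npoints_xpoint_totald.py | binary_search_smallest_valid
-- ===== SOURCE A (Python) =====
-- def binary_search_smallest_valid(coordinates, d, low, high):
--     while low <= high:
--         mid = (low + high) // 2
--         total_distance = sum([abs(coord - mid) for coord in coordinates])
--         if total_distance <= d:
--             high = mid - 1
--         else:
--             low = mid + 1
--     return low
-- ===== SOURCE B (Python) =====
-- def _bisect_left(s, x):
--     lo, hi = 0, len(s)
--     while lo < hi:
--         mid = (lo + hi) // 2
--         if s[mid] < x:
--             lo = mid + 1
--         else:
--             hi = mid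
--     return lo
--
--
-- def binary_search_smallest_valid(coordinates, d, low, high):
--     s = sorted(coordinates)
--     n = len(s)
--     pre = [0]
--     t = 0
--     for c in s:
--         t += c
--         pre.append(t)
--     while low <= high:
--         mid = (low + high) // 2
--         k = _bisect_left(s, mid)
--         total = (mid * k - pre[k]) + (pre[n] - pre[k] - mid * (n - k))
--         if total <= d:
--             high = mid - 1
--         else:
--             low = mid + 1
--     return low
-- ===== Notes on version B (the rewrite author's own statement) =====
-- stated objective: alternative
-- what changed: Instead of rescanning all coordinates for each binary-search probe, B sorts the coordinates once, builds prefix sums, and answers each distance-sum query via a hand-written bisect_left over the sorted array.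
import Mathlib
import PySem

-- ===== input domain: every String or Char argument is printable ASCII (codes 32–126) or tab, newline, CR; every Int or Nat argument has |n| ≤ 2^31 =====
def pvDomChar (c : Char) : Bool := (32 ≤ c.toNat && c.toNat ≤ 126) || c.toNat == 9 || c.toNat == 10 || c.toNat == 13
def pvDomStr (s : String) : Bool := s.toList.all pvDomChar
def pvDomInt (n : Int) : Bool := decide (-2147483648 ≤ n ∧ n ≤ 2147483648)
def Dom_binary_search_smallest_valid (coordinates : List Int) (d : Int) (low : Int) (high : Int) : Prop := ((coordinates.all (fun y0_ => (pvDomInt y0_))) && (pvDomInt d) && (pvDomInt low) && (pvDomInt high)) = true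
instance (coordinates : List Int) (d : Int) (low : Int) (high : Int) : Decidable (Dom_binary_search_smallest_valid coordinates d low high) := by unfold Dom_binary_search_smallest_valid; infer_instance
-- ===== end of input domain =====

-- B replaces A's rescan of all coordinates at every binary-search probe by a one-time
-- sort + prefix sums, answering each distance-sum query via bisect (objective: alternative).

-- ===== PORT A =====
-- while low <= high: mid = (low+high)//2; total = sum(|c-mid|); branch; return low.
-- The loop is structural recursion on a fuel = the loop's measure (high+1-low).toNat,
-- which strictly decreases each iteration, so the fuel suffices for the whole loop;
-- this is only a totality device, not an algorithm change.
def bsvLoop (coordinates : List Int) (d : Int) : Nat → Int → Int → Int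
  | 0, low, _high => low
  | fuel + 1, low, high =>
    if low ≤ high then
      let mid := PySem.Int.floordiv (low + high) 2
      let total_distance := (coordinates.map (fun coord => |coord - mid|)).sum
      if total_distance ≤ d then
        bsvLoop coordinates d fuel low (mid - 1)
      else
        bsvLoop coordinates d fuel (mid + 1) high
    else low

def binary_search_smallest_valid (coordinates : List Int) (d : Int) (low : Int) (high : Int) : Int :=
  bsvLoop coordinates d (high + 1 - low).toNat low high

-- ===== PORT B =====
-- _bisect_left in Source B is the textbook lo/hi halving loop; PySem.List.bisectLeft is that
-- exact loop (same state lo, hi, same mid, same branch), so it is the step-for-step port.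
-- The while-loop of Source B, over the precomputed sorted list s, prefix sums pre and n = len(s):
-- pre indices k and n are always in range (0 ≤ k ≤ n, len(pre) = n+1), so getD _ 0 is exact.
def bsvAltLoop (s : List Int) (pre : List Int) (n : Nat) (d : Int) : Nat → Int → Int → Int
  | 0, low, _high => low
  | fuel + 1, low, high =>
    if low ≤ high then
      let mid := PySem.Int.floordiv (low + high) 2
      let k := PySem.List.bisectLeft s mid
      let total := (mid * (k : Int) - pre.getD k 0) + (pre.getD n 0 - pre.getD k 0 - mid * ((n : Int) - (k : Int)))
      if total ≤ d then
        bsvAltLoop s pre n d fuel low (mid - 1)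
      else
        bsvAltLoop s pre n d fuel (mid + 1) high
    else low

def binary_search_smallest_valid_alt (coordinates : List Int) (d : Int) (low : Int) (high : Int) : Int :=
  let s := PySem.List.sorted coordinates (fun x => x) false
  let n := s.length
  -- pre = [0]; t = 0; for c in s: t += c; pre.append(t)
  let pre := (s.foldl (fun (p : List Int × Int) c => (p.1 ++ [p.2 + c], p.2 + c)) ([0], 0)).1
  bsvAltLoop s pre n d (high + 1 - low).toNat low high

-- ===== PRECONDITION & SPEC =====
def Spec_binary_search_smallest_valid (coordinates : List Int) (d : Int) (low : Int) (high : Int) (out : Int) : Prop := out = binary_search_smallest_valid_alt coordinates d low high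
instance (coordinates : List Int) (d : Int) (low : Int) (high : Int) (out : Int) : Decidable (Spec_binary_search_smallest_valid coordinates d low high out) := by unfold Spec_binary_search_smallest_valid; infer_instance

-- ===== CLAIM (what is proved, stated in full; the proofs are below) =====
def Claim_equal_binary_search_smallest_valid : Prop := ∀ (coordinates : List Int) (d : Int) (low : Int) (high : Int), Dom_binary_search_smallest_valid coordinates d low high → Spec_binary_search_smallest_valid coordinates d low high (binary_search_smallest_valid coordinates d low high)

-- ===== LEMMAS AND PROOFS =====

-- the prefix-sum fold, characterised
theorem bsv_foldl_pre (s : List Int) (acc : List Int) (t : Int) :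
    s.foldl (fun (p : List Int × Int) c => (p.1 ++ [p.2 + c], p.2 + c)) (acc, t)
      = (acc ++ (List.range s.length).map (fun k => t + (s.take (k + 1)).sum), t + s.sum) := by
  induction s generalizing acc t with
  | nil => simp
  | cons c s ih =>
    simp only [List.foldl_cons, ih, List.length_cons, List.sum_cons,
      List.range_succ_eq_map, List.map_cons, List.map_map]
    rw [Prod.mk.injEq]
    refine ⟨?_, by ring⟩
    simp only [List.append_assoc, List.singleton_append]
    congr 1
    rw [List.cons_eq_cons]
    refine ⟨by simp, ?_⟩
    apply List.map_congr_left
    intro k _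
    simp
    ring

theorem bsv_pre_getD (s : List Int) (k : Nat) (hk : k ≤ s.length) :
    ((s.foldl (fun (p : List Int × Int) c => (p.1 ++ [p.2 + c], p.2 + c)) ([0], 0)).1).getD k 0
      = (s.take k).sum := by
  rw [bsv_foldl_pre]
  match k with
  | 0 => simp
  | k + 1 =>
    have hk' : k < s.length := by omega
    rw [List.getD_eq_getElem?_getD]
    simp [hk']

theorem bsv_sum_abs_of_lt (l : List Int) (x : Int) (h : ∀ c ∈ l, c < x) :
    (l.map (fun c => |c - x|)).sum = x * l.length - l.sum := by
  induction l with
  | nil => simp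
  | cons c l ih =>
    have hc : c < x := h c (by simp)
    have : |c - x| = x - c := by rw [abs_of_neg (by omega)]; ring
    simp only [List.map_cons, List.sum_cons, List.length_cons, this,
      ih (fun c hc => h c (by simp [hc]))]
    push_cast; ring

theorem bsv_sum_abs_of_ge (l : List Int) (x : Int) (h : ∀ c ∈ l, x ≤ c) :
    (l.map (fun c => |c - x|)).sum = l.sum - x * l.length := by
  induction l with
  | nil => simp
  | cons c l ih =>
    have hc : x ≤ c := h c (by simp)
    have : |c - x| = c - x := abs_of_nonneg (by omega)
    simp only [List.map_cons, List.sum_cons, List.length_cons, this,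
      ih (fun c hc => h c (by simp [hc]))]
    push_cast; ring

-- B's prefix-sum/bisect query equals A's scan, for any probe x
theorem bsv_cost_eq (coordinates : List Int) (x : Int) :
    (x * ((PySem.List.bisectLeft (PySem.List.sorted coordinates (fun y => y) false) x : Nat) : Int)
        - ((PySem.List.sorted coordinates (fun y => y) false).take
            (PySem.List.bisectLeft (PySem.List.sorted coordinates (fun y => y) false) x)).sum)
      + ((PySem.List.sorted coordinates (fun y => y) false).sum
          - ((PySem.List.sorted coordinates (fun y => y) false).take
              (PySem.List.bisectLeft (PySem.List.sorted coordinates (fun y => y) false) x)).sum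
          - x * (((PySem.List.sorted coordinates (fun y => y) false).length : Int)
              - ((PySem.List.bisectLeft (PySem.List.sorted coordinates (fun y => y) false) x : Nat) : Int)))
      = (coordinates.map (fun c => |c - x|)).sum := by
  have hperm : ((PySem.List.sorted coordinates (fun y => y) false).map (fun c => |c - x|)).Perm
      (coordinates.map (fun c => |c - x|)) :=
    (PySem.List.sorted_perm coordinates (fun y => y) false).map _
  set s := PySem.List.sorted coordinates (fun y => y) false with hs
  have hpair : s.Pairwise (· ≤ ·) := PySem.List.sorted_pairwise coordinates (fun y => y)
  obtain ⟨hkn, hlt, hge⟩ := PySem.List.bisectLeft_spec s x hpair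
  set k := PySem.List.bisectLeft s x with hkdef
  have hlen_take : (s.take k).length = k := by simp [List.length_take]; omega
  have htake_lt : ∀ c ∈ s.take k, c < x := by
    intro c hc
    obtain ⟨j, hj, rfl⟩ := List.getElem_of_mem hc
    have hj' : j < k := by simpa [hlen_take] using hj
    have hjs : j < s.length := by omega
    have := hlt j hjs hj'
    simpa [List.getElem_take] using this
  have hdrop_ge : ∀ c ∈ s.drop k, x ≤ c := by
    intro c hc
    obtain ⟨j, hj, rfl⟩ := List.getElem_of_mem hc
    have hjs : k + j < s.length := by
      have := hj; simp [List.length_drop] at this; omega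
    have := hge (k + j) hjs (by omega)
    simpa [List.getElem_drop] using this
  rw [← hperm.sum_eq]
  conv_rhs => rw [← List.take_append_drop k s]
  rw [List.map_append, List.sum_append, bsv_sum_abs_of_lt _ _ htake_lt,
    bsv_sum_abs_of_ge _ _ hdrop_ge, hlen_take]
  have hsum : (s.drop k).sum = s.sum - (s.take k).sum := by
    have := List.sum_take_add_sum_drop s k; omega
  have hld : ((s.drop k).length : Int) = (s.length : Int) - k := by
    simp [List.length_drop]; omega
  rw [hsum, hld]

-- B's whole query (prefix-sum lookups included) equals A's scan
theorem bsv_total_eq (coordinates : List Int) (x : Int) :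
    x * ((PySem.List.bisectLeft (PySem.List.sorted coordinates (fun x => x) false) x : Nat) : Int)
        - ((PySem.List.sorted coordinates (fun x => x) false).foldl
            (fun (p : List Int × Int) c => (p.1 ++ [p.2 + c], p.2 + c)) ([0], 0)).1.getD
            (PySem.List.bisectLeft (PySem.List.sorted coordinates (fun x => x) false) x) 0
      + (((PySem.List.sorted coordinates (fun x => x) false).foldl
            (fun (p : List Int × Int) c => (p.1 ++ [p.2 + c], p.2 + c)) ([0], 0)).1.getD
            (PySem.List.sorted coordinates (fun x => x) false).length 0
          - ((PySem.List.sorted coordinates (fun x => x) false).foldl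
              (fun (p : List Int × Int) c => (p.1 ++ [p.2 + c], p.2 + c)) ([0], 0)).1.getD
              (PySem.List.bisectLeft (PySem.List.sorted coordinates (fun x => x) false) x) 0
          - x * (((PySem.List.sorted coordinates (fun x => x) false).length : Int)
              - ((PySem.List.bisectLeft (PySem.List.sorted coordinates (fun x => x) false) x : Nat) : Int)))
      = (coordinates.map (fun c => |c - x|)).sum := by
  have hpair : (PySem.List.sorted coordinates (fun x => x) false).Pairwise (· ≤ ·) :=
    PySem.List.sorted_pairwise coordinates (fun x => x)
  have hkn := (PySem.List.bisectLeft_spec (PySem.List.sorted coordinates (fun x => x) false) x hpair).1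
  rw [bsv_pre_getD _ _ hkn, bsv_pre_getD _ _ le_rfl, List.take_length]
  exact bsv_cost_eq coordinates x

-- the two loops agree fuel-for-fuel (rewriting B's query to A's scan)
theorem bsv_loop_eq (coordinates : List Int) (d : Int) (fuel : Nat) (low high : Int) :
    bsvLoop coordinates d fuel low high
      = bsvAltLoop (PySem.List.sorted coordinates (fun x => x) false)
          ((PySem.List.sorted coordinates (fun x => x) false).foldl
              (fun (p : List Int × Int) c => (p.1 ++ [p.2 + c], p.2 + c)) ([0], 0)).1
          (PySem.List.sorted coordinates (fun x => x) false).length d fuel low high := by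
  induction fuel generalizing low high with
  | zero => rfl
  | succ fuel ih =>
    rw [bsvLoop, bsvAltLoop]
    by_cases hle : low ≤ high
    · simp only [if_pos hle]
      rw [bsv_total_eq coordinates (PySem.Int.floordiv (low + high) 2)]
      by_cases hcond : (coordinates.map (fun coord => |coord - PySem.Int.floordiv (low + high) 2|)).sum ≤ d
      · rw [if_pos hcond, if_pos hcond]; exact ih _ _
      · rw [if_neg hcond, if_neg hcond]; exact ih _ _
    · simp only [if_neg hle]

-- ===== VERDICT (by name: the statement is the Claim_ definition above) =====
theorem binary_search_smallest_valid_spec : Claim_equal_binary_search_smallest_valid := by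
  intro coordinates d low high _
  unfold Spec_binary_search_smallest_valid binary_search_smallest_valid binary_search_smallest_valid_alt
  exact bsv_loop_eq coordinates d (high + 1 - low).toNat low high
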